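-- pv_equiv track=rewrite | github.com/RasaHQ/rasa | rasa_core/events/__init__.py | first_key
-- ===== SOURCE A (Python) =====
-- def first_key(d, default_key):
--     if len(d) > 1:
--         for k, v in d.items():
--             if k != default_key:
--                 # we return the first key that is not the default key
--                 return k
--     elif len(d) == 1:
--         return list(d.keys())[0]
--     else:
--         return None
-- ===== SOURCE B (Python) =====
-- def first_key(d, default_key):
--     # stable sort by the boolean "is the default key": non-default keys keep their
--     # original order and come first, so the head is the answer; empty dict -> None
--     ks = sorted(d, key=lambda k: k == default_key)
--     return ks[0] if ks else None
-- ===== Notes on version B (the rewrite author's own statement) =====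
-- stated objective: alternative
-- what changed: Replaces the three-way length dispatch with a loop by a stable sort of the keys on the boolean 'key == default_key' (non-default keys float to the front in original order) followed by taking the head, or None when empty.
import Mathlib
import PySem

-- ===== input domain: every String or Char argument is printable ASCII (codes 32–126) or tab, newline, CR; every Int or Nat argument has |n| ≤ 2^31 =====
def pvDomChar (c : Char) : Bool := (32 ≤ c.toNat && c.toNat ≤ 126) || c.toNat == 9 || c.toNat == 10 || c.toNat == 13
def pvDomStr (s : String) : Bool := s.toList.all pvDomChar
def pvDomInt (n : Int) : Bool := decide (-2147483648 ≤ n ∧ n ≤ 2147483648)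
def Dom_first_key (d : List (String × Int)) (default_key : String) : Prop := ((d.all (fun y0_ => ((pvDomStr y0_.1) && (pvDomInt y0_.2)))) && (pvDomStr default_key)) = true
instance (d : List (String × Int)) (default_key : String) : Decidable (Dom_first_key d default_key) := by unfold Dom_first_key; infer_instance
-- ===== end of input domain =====

-- B replaces A's branch-and-loop with a stable sort of the keys on "key == default_key"
-- followed by taking the head (objective: alternative algorithm, not faster).

-- ===== PORT A =====
-- the `for k, v in d.items(): if k != default_key: return k` loop
def first_key_loopA : List (String × Int) → String → Option String
  | [], _ => none
  | (k, _) :: rest, default_key =>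
      if k ≠ default_key then some k else first_key_loopA rest default_key

def first_key (d : List (String × Int)) (default_key : String) : Option String :=
  if d.length > 1 then
    first_key_loopA d default_key
  else if d.length = 1 then
    PySem.List.pyGet? (d.map Prod.fst) 0    -- list(d.keys())[0]; in range since len == 1
  else
    none

-- ===== PORT B =====
-- sorted(d, key=lambda k: k == default_key): Python sorts bools as the ints 0/1, exact here
def first_key_alt (d : List (String × Int)) (default_key : String) : Option String :=
  let ks := PySem.List.sorted (d.map Prod.fst) (fun k => if k == default_key then (1 : Nat) else 0)
  ks.head?        -- ks[0] if ks else None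

-- ===== PRECONDITION & SPEC =====
-- d encodes a Python dict, whose keys are distinct; Pre_ states exactly that.
def Pre_first_key (d : List (String × Int)) (default_key : String) : Prop :=
  (d.map Prod.fst).Nodup
instance (d : List (String × Int)) (default_key : String) : Decidable (Pre_first_key d default_key) := by unfold Pre_first_key; infer_instance

def pvWitness_first_key : (List (String × Int)) × String := ([("a", 1), ("b", 2)], "a")

def Spec_first_key (d : List (String × Int)) (default_key : String) (out : Option String) : Prop := out = first_key_alt d default_key
instance (d : List (String × Int)) (default_key : String) (out : Option String) : Decidable (Spec_first_key d default_key out) := by unfold Spec_first_key; infer_instance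

-- ===== CLAIM (what is proved, stated in full; the proofs are below) =====
def Claim_equal_first_key : Prop := ∀ (d : List (String × Int)) (default_key : String), Dom_first_key d default_key → Pre_first_key d default_key → Spec_first_key d default_key (first_key d default_key)

-- ===== LEMMAS AND PROOFS =====

-- inserting into a "zeros then ones" partition keeps the partition (stability of insertBy on a 0/1 key)
theorem insertBy_partition {α : Type} (key : α → Nat) (hkey : ∀ a, key a = 0 ∨ key a = 1)
    (x : α) (A B : List α) (hA : ∀ a ∈ A, key a = 0) (hB : ∀ b ∈ B, key b = 1) :
    PySem.List.insertBy (fun a b => decide (key a < key b)) x (A ++ B) =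
      if key x = 0 then A ++ x :: B else (A ++ B) ++ [x] := by
  induction A with
  | nil =>
    cases B with
    | nil => rcases hkey x with h | h <;> simp [PySem.List.insertBy, h]
    | cons b bs =>
      have hb := hB b (by simp)
      rcases hkey x with h | h
      · simp [PySem.List.insertBy, h, hb]
      · have : PySem.List.insertBy (fun a b => decide (key a < key b)) x (b :: bs) = (b :: bs) ++ [x] := by
          apply PySem.List.insertBy_of_forall_not_before
          intro y hy
          have := hB y hy
          simp [h, this]
        simpa [h] using this
  | cons a as ih =>
    have ha := hA a (by simp)
    have ih' := ih (fun a' h' => hA a' (by simp [h']))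
    rcases hkey x with h | h <;>
      simp [PySem.List.insertBy, h, ha, ih'] at * <;> simp [ih', h]

-- stable sort by a 0/1 key is the stable partition
theorem foldl_insert_partition {α : Type} (key : α → Nat) (hkey : ∀ a, key a = 0 ∨ key a = 1)
    (xs A B : List α) (hA : ∀ a ∈ A, key a = 0) (hB : ∀ b ∈ B, key b = 1) :
    List.foldl (fun acc x => PySem.List.insertBy (fun a b => decide (key a < key b)) x acc) (A ++ B) xs
      = (A ++ xs.filter (fun x => key x == 0)) ++ (B ++ xs.filter (fun x => key x != 0)) := by
  induction xs generalizing A B with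
  | nil => simp
  | cons x xs ih =>
    simp only [List.foldl_cons, insertBy_partition key hkey x A B hA hB]
    rcases hkey x with h | h
    · have step := ih (A ++ [x]) B
        (by intro a ha; rcases List.mem_append.mp ha with h' | h'
            · exact hA a h'
            · simp at h'; simpa [h'] using h)
        hB
      simpa [List.filter_cons, h] using step
    · have step := ih A (B ++ [x]) hA
        (by intro b hb; rcases List.mem_append.mp hb with h' | h'
            · exact hB b h'
            · simp at h'; simpa [h'] using h)
      simpa [List.filter_cons, h] using step

theorem sorted_binary_key {α : Type} (key : α → Nat) (hkey : ∀ a, key a = 0 ∨ key a = 1)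
    (xs : List α) :
    PySem.List.sorted xs key =
      xs.filter (fun x => key x == 0) ++ xs.filter (fun x => key x != 0) := by
  have := foldl_insert_partition key hkey xs [] [] (by simp) (by simp)
  simpa [PySem.List.sorted_eq_foldl_insertBy] using this

-- A's loop is find? of the first non-default key
theorem loopA_eq_find? (d : List (String × Int)) (dk : String) :
    first_key_loopA d dk = (d.find? (fun p => p.1 != dk)).map Prod.fst := by
  induction d with
  | nil => rfl
  | cons x rest ih =>
    obtain ⟨k, v⟩ := x
    by_cases h : k = dk
    · simp [first_key_loopA, List.find?, bne, h, ih]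
    · have hb : (k == dk) = false := beq_eq_false_iff_ne.mpr h
      simp [first_key_loopA, List.find?, bne, h, hb]

-- with at least two distinct keys, a non-default key exists
theorem find?_ne_none_of_two (x y : String × Int) (rest : List (String × Int)) (dk : String)
    (hxy : x.1 ≠ y.1) :
    (List.find? (fun p => p.1 != dk) (x :: y :: rest)) ≠ none := by
  by_cases hx : x.1 = dk
  · have hy : (y.1 == dk) = false := beq_eq_false_iff_ne.mpr (by rw [← hx] at *; exact fun h => hxy h.symm)
    simp [List.find?, bne, hx, hy]
  · have hb : (x.1 == dk) = false := beq_eq_false_iff_ne.mpr hx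
    simp [List.find?, bne, hb]

-- (filter p l).head? is find? p l
theorem head?_filter_eq_find? {α : Type} (p : α → Bool) (l : List α) :
    (l.filter p).head? = l.find? p := by
  induction l with
  | nil => rfl
  | cons x xs ih => by_cases h : p x <;> simp [List.filter_cons, List.find?, h, ih]

-- ===== VERDICT (by name: the statement is the Claim_ definition above) =====
theorem first_key_spec : Claim_equal_first_key := by
  intro d dk _ pre
  unfold Spec_first_key first_key first_key_alt
  have hkey : ∀ k : String, (if k == dk then (1 : Nat) else 0) = 0 ∨ (if k == dk then (1 : Nat) else 0) = 1 := by
    intro k; by_cases h : k = dk <;> simp [h]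
  rw [sorted_binary_key _ hkey]
  have hcond : (fun k : String => ((if k == dk then (1 : Nat) else 0) == 0)) = (fun k => k != dk) := by
    funext k; by_cases h : k = dk <;> simp [h]
  have hcond' : (fun k : String => ((if k == dk then (1 : Nat) else 0) != 0)) = (fun k => k == dk) := by
    funext k; by_cases h : k = dk <;> simp [h]
  rcases d with _ | ⟨x, d'⟩
  · simp
  rcases d' with _ | ⟨y, rest⟩
  · -- singleton: A returns the only key, B's sorted list is that key alone
    by_cases h : x.1 = dk <;>
      simp [PySem.List.pyGet?, PySem.List.pyIdx?, hcond, hcond', h, List.filter_cons]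
  · -- two or more distinct keys: a non-default key exists and both sides return the first one
    have hxy : x.1 ≠ y.1 := by
      unfold Pre_first_key at pre
      have h1 : x.1 ∉ ((y :: rest).map Prod.fst) := (List.nodup_cons.mp pre).1
      exact fun h => h1 (by simp [h])
    have hne := find?_ne_none_of_two x y rest dk hxy
    obtain ⟨p, hp⟩ := Option.ne_none_iff_exists'.mp hne
    have hF0 : ((x :: y :: rest).map Prod.fst).filter
        (fun k => ((if k == dk then (1 : Nat) else 0) == 0)) =
        ((x :: y :: rest).filter (fun q => q.1 != dk)).map Prod.fst := by
      rw [hcond, List.filter_map]; rfl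
    have hhead : (((x :: y :: rest).filter (fun q => q.1 != dk)).map Prod.fst).head?
        = some p.1 := by
      rw [List.head?_map, head?_filter_eq_find?, hp]; rfl
    simp only [List.length_cons, loopA_eq_find?, hp, hF0]
    rw [List.head?_append_of_ne_nil]
    · simp [hhead]
    · intro hnil; rw [hnil] at hhead; simp at hhead
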